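/- GENERATED by tools/from_farm_form.py from prooffarm-gif/accepted/DGifGetScreenDesc.5/Lemmas.lean (a worked proof of the farm's unit `DGifGetScreenDesc.5`,
   accepted by the verdict) — do not edit. -/
import Gif.Spec.Units.DGifGetScreenDesc_5
import Gif.Spec.AllSegs

/-!
  Lemmas for the unit `DGifGetScreenDesc.5` (THE HEAD OF THE COLOUR LOOP of a protected function, dgif_lib.c:288-294, 309): the
  segment is walked in THREE STEPS that meet at the return addresses of its two contract calls, with a private assertion at each.
  The heap and the forest are no longer the entry's here (`Hc`, `withMap F mp`: the map is adopted), and the short-read arm frees the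
  map again: behind GifFreeMapObject the heap is `(Hc.release mp.colors).release mp.obj` and the field `gif.SColorMap` DANGLES until
  the store of NULL (`gsd5_AtRet29` carries `Shape` for the forest with the map and `Owns` for the forest without it).

      gsd5_env_at_call   `Env.at_call` (Gif/Spec/FrameCarry.lean) for a heap / forest that are not the entry's
      gsd5_AtRet19       the assertion at 0x10827b (`ret19`): `Head` + `1 ≤ m` + `eax ≤ 3`
      gsd5_seg_read      0x108253 … the checked load of `ColorCount`, `jle` … the call of InternalRead … 0x10827b: `Head` → `gsd5_AtRet19`;
                         `ColorCount ≤ i`: 0x10836a, `r12d = 1`, 0x1080f7: → `Exit` (GIF_OK, heap `Hc`, forest `withMap F mp`)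
      gsd5_AtRet29       the assertion at 0x10833f (`ret29`): `Core`, the heap after the two `free`s, the dangling shape
      gsd5_seg_free      0x10827b … `cmp eax, 3` … 0x108284: `gsd5_AtRet19` → `InLoop`; fewer bytes: 0x10832a … the checked load of
                         `gif.SColorMap`, the call of GifFreeMapObject … 0x10833f: → `gsd5_AtRet29`
      gsd5_seg_null      0x10833f … the checked stores `SColorMap = NULL`, `Error = 102`, `r12d = 0` … 0x1080f7: `gsd5_AtRet29` → `Exit`
                         (GIF_ERROR, heap `(Hc.release mp.colors).release mp.obj`, forest `F`)

  The general lemmas: Gif/Spec/FrameCarry.lean §5 (`store_stack`), Carry.lean §4 (`BufOK.own`), §6 (`GifOK.scm_live`, `Owns.free_scm`),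
  ForestCarry.lean §3 (`Shape.set_scm`), Common.lean §5 (`Shape.sameExcept`, `Loose.stack / .header / .shadow`, `Placed.release`).
-/

open X86 X86.User Asan ProgX.Base ProgX.Base.Spec Gif.Spec

set_option maxRecDepth 4000
set_option maxHeartbeats 4000000

namespace Gif.Spec.DGifGetScreenDesc_5

/-- **`Env` at the entry of a callee, for a heap `Hc` and a forest `Fc` that are no longer the entry's** (the loop runs after the
allocation of the map): `Env.at_call` of Gif/Spec/FrameCarry.lean with the static facts of `HeapPre` taken from the entry's
`HeapPre H` through `SameRegion H Hc`. -/
theorem gsd5_env_at_call {H Hc : Heap} {rest : List Obj} {frames : List (Nat × FrameLayout)} {Fc : Forest} {R : Rd} {e s : State}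
    {base top lo : Nat} {Fl : FrameLayout} {mem : Mem} (hpre : HeapPre H rest frames e) (hctx : Ctx rest frames R)
    (hregion : SameRegion H Hc)
    (hinv : HeapInv Hc rest ((base, Fl) :: frames) top mem) (hok : GifOK Hc Fc R mem)
    (hs : Mem.SameExcept [⟨lo, top⟩] mem s.mem) (hlo : 0x700000 ≤ lo) (htop : top ≤ (e.reg .rsp).toNat + 8)
    (hsp : (s.reg .rsp).toNat + 8 ≤ top) (h8 : (s.reg .rsp).toNat % 8 = 0) (hlo' : 0x700000 ≤ (s.reg .rsp).toNat + 8) :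
    Env Hc rest ((base, Fl) :: frames) Fc R s := by
  have hcur := hctx.cursor_range hpre.inv.shadow
  have hhi := hinv.shadow.stack.hi
  have hoff := hinv.heap.offStack
  have hroom := hinv.heap.room
  have hun : ShadowUntouched mem s.mem := by
    apply hs.eqOn
    intro w hw
    have e := List.mem_singleton.mp hw
    rw [e]
    simp only
    omega
  have hinv' : HeapInv Hc rest ((base, Fl) :: frames) ((s.reg .rsp).toNat + 8) s.mem := by
    refine (hinv.sameExcept hun hs ?_).lower hsp (by omega) hlo'
    intro w hw
    have e := List.mem_singleton.mp hw
    rw [e]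
    left
    simp only
    omega
  refine ⟨⟨hinv', hregion.1.trans hpre.base, hregion.2.trans hpre.limit, hpre.text, hpre.offText⟩, hctx.push base Fl, ?_⟩
  apply hok.sameExcept hinv.heap ⟨hcur.1, hcur.2.1⟩ hs
  intro w hw
  have e := List.mem_singleton.mp hw
  rw [e]
  apply Loose.stack hinv.heap
  · simp only
    omega
  · simp only
    omega
  · simp only
    omega

/-- **At 10827BH (ret19), `InternalRead(gif, Buf, 3)` has returned**: the loop invariant `Head` (same heap `Hc`, same forest, same
measure `m`), `1 ≤ m` (the `jle` at 108263H was not taken: `i < ColorCount`), and `eax = k ≤ 3` the bytes delivered. -/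
structure gsd5_AtRet19 (H : Heap) (rest : List Obj) (frames : List (Nat × FrameLayout)) (F : Forest) (R : Rd) (Hc : Heap)
    (mp : Map) (m : Nat) (u₀ e : State) (ret : Word) (v : State) : Prop where
  head : DGifGetScreenDesc.Head Gif.L.DGifGetScreenDesc.ret19 H rest frames F R Hc mp m u₀ e ret v
  lt : 1 ≤ m
  count : (v.reg .rax).toNat ≤ 3

/-- **108253H … the call of InternalRead … 10827BH (ret19)** (dgif_lib.c:288-290): `r12 = gif.SColorMap = mp.obj`, the checked load
of `ColorCount` (the head of the live 24-byte map object), `cmp [r12], r13d ; jle`. `ColorCount ≤ i`: `r12d = 1`, to the epilogue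
(`Exit` with the present heap and the forest with the map). Otherwise `InternalRead(gif, Buf, 3)` with `Buf` the object of the own
frame at `rsp + 32`. -/
theorem gsd5_seg_read (Lay : Layout) (hLay : Lay.hi = 0x1000000) (μ : Microarch) (hμ : UserX.MicroOK μ) (u₀ : State)
    (hcode : HasCodeNat Lay u₀ Gif.L.DGifGetScreenDesc.entry Gif.Code.code_DGifGetScreenDesc.nat Gif.L.DGifGetScreenDesc.size)
    (H : Heap) (rest : List Obj) (frames : List (Nat × FrameLayout)) (F : Forest) (R : Rd) (Hc : Heap) (mp : Map) (m : Nat)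
    (e : State) (ret : Word)
    (h_InternalRead : Calls Lay μ ProgX.Base.WayInv (ProgX.Base.conv u₀) Gif.L.InternalRead.entry
      (Gif.Spec.InternalRead.spec Hc rest (DGifGetScreenDesc.framesIn frames e) (DGifGetScreenDesc.withMap F mp) R 3))
    (h_asan_load4_noabort : Asan.SmallCheck Lay μ ProgX.Base.WayInv (ProgX.Base.CodeOK u₀) [.rax, .rcx, .rdx] 4
      ProgX.Base.L.__asan_load4_noabort.entry)
    (v : State) (hat : DGifGetScreenDesc.Head Gif.L.DGifGetScreenDesc.at_108253 H rest frames F R Hc mp m u₀ e ret v) :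
    ReachVia Lay μ ProgX.Base.WayInv v (fun w =>
      gsd5_AtRet19 H rest frames F R Hc mp m u₀ e ret w ∨ DGifGetScreenDesc.Exit H rest frames F R u₀ e ret w) := by
  obtain ⟨hcore, hregion, hinv, hok, hidx⟩ := hat
  have he := hcore.entry
  v_entry he
  obtain ⟨henv, hrdi, hscm0⟩ := hcore.pre
  have w_rip := hcore.rip
  have c_rsp : v.reg .rsp = e.reg .rsp - 120 := hcore.rsp
  have c_rbx : v.reg .rbx = e.reg .rdi := hcore.rbx
  obtain ⟨z, c_r13⟩ : ∃ z, v.reg .r13 = z := ⟨_, rfl⟩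
  rw [c_r13] at hidx
  have w_kept : RegsKept [.rsp] v v := RegsKept.refl _ _
  have w_eq : Mem.EqOn ProgX.Base.L.textLo ProgX.Base.L.textHi u₀.mem v.mem := ProgX.Base.conv_code_eqOn hcore.code
  have hdf := (show abiInv _ from hcore.abi).1
  have hmx := (show abiInv _ from hcore.abi).2
  have hsse := ProgX.Base.sseOK_of_abiInv hcore.abi
  have k_r15 : v.mem.readLE (e.reg .rsp - 8) 8 = (e.reg .r15).toNat := hcore.slot_r15
  have k_r14 : v.mem.readLE (e.reg .rsp - 16) 8 = (e.reg .r14).toNat := hcore.slot_r14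
  have k_r13 : v.mem.readLE (e.reg .rsp - 24) 8 = (e.reg .r13).toNat := hcore.slot_r13
  have k_r12 : v.mem.readLE (e.reg .rsp - 32) 8 = (e.reg .r12).toNat := hcore.slot_r12
  have k_rbp : v.mem.readLE (e.reg .rsp - 40) 8 = (e.reg .rbp).toNat := hcore.slot_rbp
  have k_rbx : v.mem.readLE (e.reg .rsp - 48) 8 = (e.reg .rbx).toNat := hcore.slot_rbx
  have k_ra : UInt64.ofNat (v.mem.readLE (e.reg .rsp) 8) = ret := hcore.slot_ra
  have hsame : Mem.SameExcept
    [⟨(e.reg .rsp).toNat - 400, (e.reg .rsp).toNat⟩,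
     shadowSpan ((e.reg .rsp).toNat - 120) ((e.reg .rsp).toNat - 56),
     ⟨0x800000, 0x1000020⟩,
     ⟨R.cur, R.cur + 8⟩] e.mem v.mem := hcore.same
  have hcur := henv.ctx.cursor_range henv.heap.inv.shadow
  have hbase : Hc.base = 0x800000 := hregion.1.trans henv.heap.base
  have hgin := hok.owns.inside hinv.heap (o := (F.gif, 120)) List.mem_cons_self
  simp only at hgin
  rw [hbase] at hgin
  have hgin1 := hgin.1
  have hgin2 := hgin.2.2.2.2
  clear hgin
  -- the colour map
  obtain ⟨hl_obj, hl_col, hne_col, hcolors⟩ := hok.scm_live (m := mp) rfl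
  have hshape_scm : GifFileType.SColorMap v.mem F.gif = mp.obj ∧ ColorMapObject.ColorCount v.mem mp.obj = mp.count ∧
      ColorMapObject.Colors v.mem mp.obj = mp.colors ∧ 1 ≤ mp.count ∧ mp.count ≤ 256 := hok.shape.scm
  obtain ⟨hptr, hcnt, _, hcnt1, hcnt256⟩ := hshape_scm
  simp only [gfield] at hptr hcnt
  obtain ⟨cap, hcap⟩ := hl_obj
  have hrg := hinv.heap.obj_range hcap
  have hin := hinv.heap.obj_inside hcap
  have hl_obj : Hc.Live mp.obj 24 := ⟨cap, hcap⟩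
  rw [hbase] at hrg
  simp only at hrg hin
  have l_scm : v.mem.readLE (e.reg .rdi + 0x18) 8 = mp.obj := by
    rw [rd_eq_readLE v.mem (e.reg .rdi + 0x18) (F.gif + 24) 8 (by u_omega)]
    exact hptr
  have l_cnt : v.mem.readLE (UInt64.ofNat mp.obj) 4 = mp.count := by
    rw [rd_eq_readLE v.mem (UInt64.ofNat mp.obj) (mp.obj) 4 (by u_omega)]
    exact hcnt
  u_walk hcode [hμ.vendor] until [Gif.L.DGifGetScreenDesc.ret19, Gif.L.DGifGetScreenDesc.at_1080f7] span [ProgX.Base.L.textLo, ProgX.Base.L.textHi] side (v_side)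
  case check_10825a =>
    -- dgif_lib.c:288 the load of `SColorMap->ColorCount`: 4 bytes at the head of the live 24-byte map object
    have hun : ShadowUntouched v.mem s_10825a.mem := by v_untouched
    have hl : LiveIn (Hc.liveObjs ++ rest) (DGifGetScreenDesc.framesIn frames e) mp.obj 24 :=
      hl_obj.liveIn rest _ (Nat.le_refl _) (Nat.le_refl _)
    exact hl.accSmall hinv.shadow hun _ 4 (by decide) (by u_omega) (by u_omega)
  case call_inv =>
    v_inv
  case pre_108276 =>
    -- INTERNALREAD'S PRECONDITION, for the present heap and forest
    have hs : Mem.SameExcept [⟨(e.reg .rsp).toNat - 400, (e.reg .rsp).toNat - 120⟩] v.mem s_108276.mem := by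
      rw [w_mem]
      u_same
    have henv' : Env Hc rest (DGifGetScreenDesc.framesIn frames e) (DGifGetScreenDesc.withMap F mp) R s_108276 := by
      refine gsd5_env_at_call henv.heap henv.ctx hregion hinv hok hs (by omega) (by omega) ?_ ?_ ?_
      · rw [w_rsp]
        u_omega
      · rw [w_rsp]
        u_omega
      · rw [w_rsp]
        u_omega
    have ho : (⟨(e.reg .rsp).toNat - 120 + 32, 3, .stack⟩ : Obj) ∈
        Gif.Frames.DGifGetScreenDesc.objsAt ((e.reg .rsp).toNat - 120) := List.mem_cons_self
    have hsz : Gif.Frames.DGifGetScreenDesc.size = 64 := rfl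
    have hb : (e.reg .rsp).toNat - 120 + Gif.Frames.DGifGetScreenDesc.size ≤ (e.reg .rsp).toNat + 8 := by
      rw [hsz]
      omega
    have hbuf : BufOK Hc rest (DGifGetScreenDesc.framesIn frames e) (DGifGetScreenDesc.withMap F mp) R
        (s_108276.reg .rsi).toNat 3 := by
      apply BufOK.own henv.heap henv.ctx hinv hb ho
      · rw [w_rsi]
        u_omega
      · rw [w_rsi]
        u_omega
    refine ⟨henv', ?_, ?_, by decide, by decide, hbuf⟩
    · rw [w_rdi]
      exact hrdi
    · rw [w_rdx]
      decide
  case cont =>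
    -- 0x1080f7 FROM 0x108370 (dgif_lib.c:309): `ColorCount ≤ i`, `r12d = 1`: GIF_OK with the present heap and the forest with the map.
    -- The only store since `v`: the check call's return address (stack)
    obtain ⟨hinvA, hokA, hremA⟩ := store_stack hinv hok ⟨hcur.1, hcur.2.1⟩ (e.reg .rsp - 128) 8 1081951
      (by u_omega) (by u_omega)
    rw [← w_mem] at hinvA hokA hremA
    have hcore1 : DGifGetScreenDesc.Core Gif.L.DGifGetScreenDesc.at_1080f7 H rest frames F R u₀ e ret s_108370 := {
      entry := hcore.entry
      pre := hcore.pre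
      rip := w_rip
      rsp := w_rsp
      rbx := (w_kept.get .rbx rfl).trans c_rbx
      rbp := (w_kept.get .rbp rfl).trans hcore.rbp
      slot_r15 := by
        rw [w_mem]
        u_frame k_r15
      slot_r14 := by
        rw [w_mem]
        u_frame k_r14
      slot_r13 := by
        rw [w_mem]
        u_frame k_r13
      slot_r12 := by
        rw [w_mem]
        u_frame k_r12
      slot_rbp := by
        rw [w_mem]
        u_frame k_rbp
      slot_rbx := by
        rw [w_mem]
        u_frame k_rbx
      slot_ra := by
        rw [w_mem]
        u_frame k_ra
      rem := by
        rw [hremA]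
        exact hcore.rem
      same := by
        rw [w_mem]
        u_same
      code := ProgX.Base.conv_code_in w_eq
      abi := by
        refine ProgX.Base.abiInv_of ?_ ?_
        · rw [w_flags]
          simp only [X86.User.df_setStatus]
          exact w_df_10825a
        · rw [w_mxcsr]
          exact hmx
    }
    refine ReachVia.done (Or.inr ⟨Hc, DGifGetScreenDesc.withMap F mp, ?_⟩)
    exact {
      core := hcore1
      region := hregion
      sameBut := ⟨rfl, rfl, rfl, rfl, rfl⟩
      inv := hinvA
      ok := hokA
      res := by
        left
        rw [w_r12]
        decide
      err := by
        intro h0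
        rw [w_r12] at h0
        exact absurd h0 (by decide)
    }
  -- 0x10827b (ret19): INTERNALREAD HAS RETURNED. Its post: `k ≤ 3` bytes delivered
  obtain ⟨k, hk1, hk2, hk3, hk4, hk5, hback⟩ : ReadPost Hc rest (DGifGetScreenDesc.framesIn frames e)
    (DGifGetScreenDesc.withMap F mp) R 3 s_108276 s_108276r := w_post
  -- the branch fact of `cmp [r12], r13d ; jle` (not taken): `i < ColorCount`, so `1 ≤ m`
  have hlt : 1 ≤ m := by
    have hz : z.toNat < 2 ^ 31 := by omega
    have e1 : (BitVec.ofNat 32 mp.count).toNat = mp.count := by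
      rw [BitVec.toNat_ofNat]
      omega
    rw [part32_toInt_small z hz, toInt_of_lt _ (by omega), e1] at hbr_108263
    omega
  clear hbr_108263
  -- the reader at InternalRead's entry is where it was at `v`: only the return address was pushed
  have hs0 : Mem.SameExcept [⟨(e.reg .rsp).toNat - 400, (e.reg .rsp).toNat - 120⟩] v.mem s_108276.mem := by
    rw [w_mem_108276]
    u_same
  have hrem0 : rem R s_108276.mem = rem R v.mem := by
    apply rem_sameExcept hs0 (by omega)
    intro w hw
    have e := List.mem_singleton.mp hw
    rw [e]
    simp only
    omega
  have e_top : (s_108276.reg .rsp).toNat + 8 = (e.reg .rsp).toNat - 120 := by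
    rw [w_rsp_108276]
    u_omega
  -- the callee's footprint in terms of `v`
  v_after_call w_rsp_108276 w_mem_108276
  simp only [w_rsi_108276] at w_same
  -- THE SLOTS AND THE RETURN ADDRESS, over the pushed return address and through InternalRead's footprint
  have hp15 : s_108276.mem.readLE (e.reg .rsp - 8) 8 = (e.reg .r15).toNat := by
    rw [w_mem_108276]
    u_frame k_r15
  rw [w_mem_108276] at hp15
  have hs15 : s_108276r.mem.readLE (e.reg .rsp - 8) 8 = (e.reg .r15).toNat := by u_frame hp15
  have hp14 : s_108276.mem.readLE (e.reg .rsp - 16) 8 = (e.reg .r14).toNat := by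
    rw [w_mem_108276]
    u_frame k_r14
  rw [w_mem_108276] at hp14
  have hs14 : s_108276r.mem.readLE (e.reg .rsp - 16) 8 = (e.reg .r14).toNat := by u_frame hp14
  have hp13 : s_108276.mem.readLE (e.reg .rsp - 24) 8 = (e.reg .r13).toNat := by
    rw [w_mem_108276]
    u_frame k_r13
  rw [w_mem_108276] at hp13
  have hs13 : s_108276r.mem.readLE (e.reg .rsp - 24) 8 = (e.reg .r13).toNat := by u_frame hp13
  have hp12 : s_108276.mem.readLE (e.reg .rsp - 32) 8 = (e.reg .r12).toNat := by
    rw [w_mem_108276]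
    u_frame k_r12
  rw [w_mem_108276] at hp12
  have hs12 : s_108276r.mem.readLE (e.reg .rsp - 32) 8 = (e.reg .r12).toNat := by u_frame hp12
  have hpbp : s_108276.mem.readLE (e.reg .rsp - 40) 8 = (e.reg .rbp).toNat := by
    rw [w_mem_108276]
    u_frame k_rbp
  rw [w_mem_108276] at hpbp
  have hsbp : s_108276r.mem.readLE (e.reg .rsp - 40) 8 = (e.reg .rbp).toNat := by u_frame hpbp
  have hpbx : s_108276.mem.readLE (e.reg .rsp - 48) 8 = (e.reg .rbx).toNat := by
    rw [w_mem_108276]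
    u_frame k_rbx
  rw [w_mem_108276] at hpbx
  have hsbx : s_108276r.mem.readLE (e.reg .rsp - 48) 8 = (e.reg .rbx).toNat := by u_frame hpbx
  have hpra : UInt64.ofNat (s_108276.mem.readLE (e.reg .rsp) 8) = ret := by
    rw [w_mem_108276]
    u_frame k_ra
  rw [w_mem_108276] at hpra
  have hsra : UInt64.ofNat (s_108276r.mem.readLE (e.reg .rsp) 8) = ret := by u_frame hpra
  -- the footprint since the entry: InternalRead's windows lie inside the function's
  have hsame1 : Mem.SameExcept
    [⟨(e.reg .rsp).toNat - 400, (e.reg .rsp).toNat⟩,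
     shadowSpan ((e.reg .rsp).toNat - 120) ((e.reg .rsp).toNat - 56),
     ⟨0x800000, 0x1000020⟩,
     ⟨R.cur, R.cur + 8⟩] e.mem s_108276r.mem := by u_same
  -- the heap's invariant comes back with the clean stack at the callee's `rsp + 8` = the body's `rsp`
  have hinv1 : HeapInv Hc rest (DGifGetScreenDesc.framesIn frames e) ((e.reg .rsp).toNat - 120) s_108276r.mem := by
    rw [← e_top]
    exact hback.inv
  have hcore1 : DGifGetScreenDesc.Core Gif.L.DGifGetScreenDesc.ret19 H rest frames F R u₀ e ret s_108276r := {
    entry := hcore.entry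
    pre := hcore.pre
    rip := w_rip
    rsp := w_rsp
    rbx := (w_kept.get .rbx rfl).trans c_rbx
    rbp := (w_kept.get .rbp rfl).trans hcore.rbp
    slot_r15 := hs15
    slot_r14 := hs14
    slot_r13 := hs13
    slot_r12 := hs12
    slot_rbp := hsbp
    slot_rbx := hsbx
    slot_ra := hsra
    rem := by
      have h1 := hback.rem
      rw [hrem0] at h1
      exact Nat.le_trans h1 hcore.rem
    same := hsame1
    code := w_code
    abi := w_inv
  }
  refine ReachVia.done (Or.inl ?_)
  exact {
    head := {
      core := hcore1
      region := hregion
      inv := hinv1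
      ok := hback.ok
      idx := by
        rw [w_kept.get .r13 rfl, c_r13]
        exact hidx
    }
    lt := hlt
    count := by
      rw [hk4]
      exact hk1
  }


/-- **At 10833FH (ret29), `GifFreeMapObject(gif->SColorMap)` has returned**: the two objects of the map are freed (the heap is
`(Hc.release mp.colors).release mp.obj`), the field `gif.SColorMap` still holds `mp.obj` (IT DANGLES: `shape` is for the forest WITH
the map, `owns` for the entry's forest `F`, whose `scm` is `none`), `r12 = &gif->SColorMap`. -/
structure gsd5_AtRet29 (H : Heap) (rest : List Obj) (frames : List (Nat × FrameLayout)) (F : Forest) (R : Rd) (Hc : Heap)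
    (mp : Map) (u₀ e : State) (ret : Word) (v : State) : Prop where
  core : DGifGetScreenDesc.Core Gif.L.DGifGetScreenDesc.ret29 H rest frames F R u₀ e ret v
  region : SameRegion H ((Hc.release mp.colors).release mp.obj)
  inv : HeapInv ((Hc.release mp.colors).release mp.obj) rest (DGifGetScreenDesc.framesIn frames e)
    ((e.reg .rsp).toNat - 120) v.mem
  shape : Shape (DGifGetScreenDesc.withMap F mp) R v.mem
  placed : Placed ((Hc.release mp.colors).release mp.obj) (DGifGetScreenDesc.withMap F mp).owned
  owns : Owns ((Hc.release mp.colors).release mp.obj) F.owned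
  r12 : v.reg .r12 = e.reg .rdi + 24

/-- **10827BH (ret19) … 108284H, or … the call of GifFreeMapObject … 10833FH (ret29)** (dgif_lib.c:290-291): `cmp eax, 3 ; jne`.
Three bytes: on into the loop's body (`InLoop`, nothing written). Fewer: `r12 = &gif->SColorMap`, the checked load of the field
(`mp.obj`), `GifFreeMapObject(mp.obj)` with the ghosts `mp.colors`, `3 · mp.count` (`GifOK.scm_live`). Behind it the heap is
`(Hc.release mp.colors).release mp.obj`; the shape is kept (every window of the callee's footprint is loose: its stack, the two
headers, the shadow of the two objects), what is owned is the entry's forest (`Owns.free_scm`, `F.scm = none`). -/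
theorem gsd5_seg_free (Lay : Layout) (hLay : Lay.hi = 0x1000000) (μ : Microarch) (hμ : UserX.MicroOK μ) (u₀ : State)
    (hcode : HasCodeNat Lay u₀ Gif.L.DGifGetScreenDesc.entry Gif.Code.code_DGifGetScreenDesc.nat Gif.L.DGifGetScreenDesc.size)
    (H : Heap) (rest : List Obj) (frames : List (Nat × FrameLayout)) (F : Forest) (R : Rd) (Hc : Heap) (mp : Map) (m : Nat)
    (e : State) (ret : Word)
    (h_GifFreeMapObject : Calls Lay μ ProgX.Base.WayInv (ProgX.Base.conv u₀) Gif.L.GifFreeMapObject.entry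
      (Gif.Spec.GifFreeMapObject.spec Hc rest (DGifGetScreenDesc.framesIn frames e) mp.colors (3 * mp.count)))
    (h_asan_load8_noabort : Asan.SmallCheck Lay μ ProgX.Base.WayInv (ProgX.Base.CodeOK u₀) [.rax, .rcx, .rdx] 8
      ProgX.Base.L.__asan_load8_noabort.entry)
    (v : State) (hat : gsd5_AtRet19 H rest frames F R Hc mp m u₀ e ret v) :
    ReachVia Lay μ ProgX.Base.WayInv v (fun w =>
      DGifGetScreenDesc.InLoop H rest frames F R Hc mp m u₀ e ret w ∨ gsd5_AtRet29 H rest frames F R Hc mp u₀ e ret w) := by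
  obtain ⟨⟨hcore, hregion, hinv, hok, hidx⟩, hlt, hcount⟩ := hat
  have he := hcore.entry
  v_entry he
  obtain ⟨henv, hrdi, hscm0⟩ := hcore.pre
  have w_rip := hcore.rip
  have c_rsp : v.reg .rsp = e.reg .rsp - 120 := hcore.rsp
  have c_rbx : v.reg .rbx = e.reg .rdi := hcore.rbx
  obtain ⟨z, c_rax⟩ : ∃ z, v.reg .rax = z := ⟨_, rfl⟩
  rw [c_rax] at hcount
  have w_kept : RegsKept [.rsp] v v := RegsKept.refl _ _
  have w_eq : Mem.EqOn ProgX.Base.L.textLo ProgX.Base.L.textHi u₀.mem v.mem := ProgX.Base.conv_code_eqOn hcore.code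
  have hdf := (show abiInv _ from hcore.abi).1
  have hmx := (show abiInv _ from hcore.abi).2
  have hsse := ProgX.Base.sseOK_of_abiInv hcore.abi
  have k_r15 : v.mem.readLE (e.reg .rsp - 8) 8 = (e.reg .r15).toNat := hcore.slot_r15
  have k_r14 : v.mem.readLE (e.reg .rsp - 16) 8 = (e.reg .r14).toNat := hcore.slot_r14
  have k_r13 : v.mem.readLE (e.reg .rsp - 24) 8 = (e.reg .r13).toNat := hcore.slot_r13
  have k_r12 : v.mem.readLE (e.reg .rsp - 32) 8 = (e.reg .r12).toNat := hcore.slot_r12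
  have k_rbp : v.mem.readLE (e.reg .rsp - 40) 8 = (e.reg .rbp).toNat := hcore.slot_rbp
  have k_rbx : v.mem.readLE (e.reg .rsp - 48) 8 = (e.reg .rbx).toNat := hcore.slot_rbx
  have k_ra : UInt64.ofNat (v.mem.readLE (e.reg .rsp) 8) = ret := hcore.slot_ra
  have hsame : Mem.SameExcept
    [⟨(e.reg .rsp).toNat - 400, (e.reg .rsp).toNat⟩,
     shadowSpan ((e.reg .rsp).toNat - 120) ((e.reg .rsp).toNat - 56),
     ⟨0x800000, 0x1000020⟩,
     ⟨R.cur, R.cur + 8⟩] e.mem v.mem := hcore.same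
  have hcur := henv.ctx.cursor_range henv.heap.inv.shadow
  have hbase : Hc.base = 0x800000 := hregion.1.trans henv.heap.base
  have hgin := hok.owns.inside hinv.heap (o := (F.gif, 120)) List.mem_cons_self
  simp only at hgin
  rw [hbase] at hgin
  have hgin1 := hgin.1
  have hgin2 := hgin.2.2.2.2
  clear hgin
  -- the colour map: its two objects, where they are, and the two fields
  obtain ⟨hl_obj, hl_col, hne_col, hcolors⟩ := hok.scm_live (m := mp) rfl
  have hshape_scm : GifFileType.SColorMap v.mem F.gif = mp.obj ∧ ColorMapObject.ColorCount v.mem mp.obj = mp.count ∧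
      ColorMapObject.Colors v.mem mp.obj = mp.colors ∧ 1 ≤ mp.count ∧ mp.count ≤ 256 := hok.shape.scm
  obtain ⟨hptr, _, _, hcnt1, hcnt256⟩ := hshape_scm
  simp only [gfield] at hptr
  obtain ⟨cap, hcap⟩ := hl_obj
  have hrg := hinv.heap.obj_range hcap
  have hin := hinv.heap.obj_inside hcap
  have hl_obj : Hc.Live mp.obj 24 := ⟨cap, hcap⟩
  obtain ⟨ccap, hccap⟩ := hl_col
  have hcrg := hinv.heap.obj_range hccap
  have hcin := hinv.heap.obj_inside hccap
  have hl_col : Hc.Live mp.colors (3 * mp.count) := ⟨ccap, hccap⟩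
  rw [hbase] at hrg hcrg
  simp only at hrg hin hcrg hcin
  have l_scm : v.mem.readLE (e.reg .rdi + 0x18) 8 = mp.obj := by
    rw [rd_eq_readLE v.mem (e.reg .rdi + 0x18) (F.gif + 24) 8 (by u_omega)]
    exact hptr
  u_walk hcode [hμ.vendor] until [Gif.L.DGifGetScreenDesc.at_108284, Gif.L.DGifGetScreenDesc.ret29] span [ProgX.Base.L.textLo, ProgX.Base.L.textHi] side (v_side)
  case check_108331 =>
    -- dgif_lib.c:291 the load of `gif->SColorMap`: 8 bytes inside gif
    have hun : ShadowUntouched v.mem s_108331.mem := by v_untouched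
    have hgl : LiveIn (Hc.liveObjs ++ rest) (DGifGetScreenDesc.framesIn frames e) F.gif 120 :=
      hok.gif_live.liveIn rest _ (Nat.le_refl _) (Nat.le_refl _)
    exact hgl.accSmall hinv.shadow hun _ 8 (by decide) (by u_omega) (by u_omega)
  case call_inv =>
    v_inv
  case pre_10833a =>
    -- GIFFREEMAPOBJECT'S PRECONDITION: the heap's, and the map's two live objects with the `Colors` field
    have hs : Mem.SameExcept [⟨(e.reg .rsp).toNat - 400, (e.reg .rsp).toNat - 120⟩] v.mem s_10833a.mem := by
      rw [w_mem]
      u_same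
    have henv' : Env Hc rest (DGifGetScreenDesc.framesIn frames e) (DGifGetScreenDesc.withMap F mp) R s_10833a := by
      refine gsd5_env_at_call henv.heap henv.ctx hregion hinv hok hs (by omega) (by omega) ?_ ?_ ?_
      · rw [w_rsp]
        u_omega
      · rw [w_rsp]
        u_omega
      · rw [w_rsp]
        u_omega
    have e_obj : (s_10833a.reg .rdi).toNat = mp.obj := by
      rw [w_rdi]
      u_omega
    refine ⟨henv'.heap, Or.inr ?_⟩
    rw [e_obj]
    exact ⟨hl_obj, hl_col, hne_col, (henv'.ok.scm_live (m := mp) rfl).2.2.2⟩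
  case cont =>
    -- 0x10833f (ret29): GIFFREEMAPOBJECT HAS RETURNED. `Object` was not NULL: both objects are freed
    clear hbr_10827e
    have e_objn : (UInt64.ofNat mp.obj : Word).toNat = mp.obj := by u_omega
    have e_obj : (s_10833a.reg .rdi).toNat = mp.obj := by
      rw [w_rdi_10833a]
      exact e_objn
    have e_top : (s_10833a.reg .rsp).toNat + 8 = (e.reg .rsp).toNat - 120 := by
      rw [w_rsp_10833a]
      u_omega
    have hinv2 : HeapInv ((Hc.release mp.colors).release mp.obj) rest (DGifGetScreenDesc.framesIn frames e)
        ((e.reg .rsp).toNat - 120) s_10833ar.mem := by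
      have h := w_post.2 (by
        rw [e_obj]
        omega)
      rw [e_obj, e_top] at h
      exact h
    clear w_post
    -- the callee's footprint in terms of `v`
    v_after_call w_rsp_10833a w_mem_10833a
    simp only [w_rdi_10833a, e_objn, shadowSpan] at w_same
    -- the shadow windows by their bounds only (no `/ 8` in the context of the frame tactics)
    obtain ⟨a1, ha1⟩ : ∃ a1 : Nat, a1 = 12582912 + mp.colors / 8 := ⟨_, rfl⟩
    obtain ⟨b1, hb1⟩ : ∃ b1 : Nat, b1 = 12582912 + (mp.colors + 3 * mp.count + 7) / 8 := ⟨_, rfl⟩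
    obtain ⟨a2, ha2⟩ : ∃ a2 : Nat, a2 = 12582912 + mp.obj / 8 := ⟨_, rfl⟩
    obtain ⟨b2, hb2⟩ : ∃ b2 : Nat, b2 = 12582912 + (mp.obj + 24 + 7) / 8 := ⟨_, rfl⟩
    rw [← ha1, ← hb1, ← ha2, ← hb2] at w_same
    have ha1lo : 0xC00000 ≤ a1 := by omega
    have hb1hi : b1 ≤ 0xE00000 := by omega
    have ha2lo : 0xC00000 ≤ a2 := by omega
    have hb2hi : b2 ≤ 0xE00000 := by omega
    clear ha1 hb1 ha2 hb2
    -- THE SLOTS AND THE RETURN ADDRESS, over the pushed return address and through the callee's footprint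
    have hp15 : s_10833a.mem.readLE (e.reg .rsp - 8) 8 = (e.reg .r15).toNat := by
      rw [w_mem_10833a]
      u_frame k_r15
    rw [w_mem_10833a] at hp15
    have hs15 : s_10833ar.mem.readLE (e.reg .rsp - 8) 8 = (e.reg .r15).toNat := by u_frame hp15
    have hp14 : s_10833a.mem.readLE (e.reg .rsp - 16) 8 = (e.reg .r14).toNat := by
      rw [w_mem_10833a]
      u_frame k_r14
    rw [w_mem_10833a] at hp14
    have hs14 : s_10833ar.mem.readLE (e.reg .rsp - 16) 8 = (e.reg .r14).toNat := by u_frame hp14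
    have hp13 : s_10833a.mem.readLE (e.reg .rsp - 24) 8 = (e.reg .r13).toNat := by
      rw [w_mem_10833a]
      u_frame k_r13
    rw [w_mem_10833a] at hp13
    have hs13 : s_10833ar.mem.readLE (e.reg .rsp - 24) 8 = (e.reg .r13).toNat := by u_frame hp13
    have hp12 : s_10833a.mem.readLE (e.reg .rsp - 32) 8 = (e.reg .r12).toNat := by
      rw [w_mem_10833a]
      u_frame k_r12
    rw [w_mem_10833a] at hp12
    have hs12 : s_10833ar.mem.readLE (e.reg .rsp - 32) 8 = (e.reg .r12).toNat := by u_frame hp12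
    have hpbp : s_10833a.mem.readLE (e.reg .rsp - 40) 8 = (e.reg .rbp).toNat := by
      rw [w_mem_10833a]
      u_frame k_rbp
    rw [w_mem_10833a] at hpbp
    have hsbp : s_10833ar.mem.readLE (e.reg .rsp - 40) 8 = (e.reg .rbp).toNat := by u_frame hpbp
    have hpbx : s_10833a.mem.readLE (e.reg .rsp - 48) 8 = (e.reg .rbx).toNat := by
      rw [w_mem_10833a]
      u_frame k_rbx
    rw [w_mem_10833a] at hpbx
    have hsbx : s_10833ar.mem.readLE (e.reg .rsp - 48) 8 = (e.reg .rbx).toNat := by u_frame hpbx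
    have hpra : UInt64.ofNat (s_10833a.mem.readLE (e.reg .rsp) 8) = ret := by
      rw [w_mem_10833a]
      u_frame k_ra
    rw [w_mem_10833a] at hpra
    have hsra : UInt64.ofNat (s_10833ar.mem.readLE (e.reg .rsp) 8) = ret := by u_frame hpra
    -- the footprint since `v`, window by window (each is LOOSE for the shape)
    have hs1 : Mem.SameExcept
      [⟨(e.reg .rsp).toNat - 400, (e.reg .rsp).toNat - 120⟩,
       ⟨mp.colors - 24, mp.colors - 16⟩,
       ⟨a1, b1⟩,
       ⟨mp.obj - 24, mp.obj - 16⟩,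
       ⟨a2, b2⟩] v.mem s_10833ar.mem := by u_same
    -- the footprint since the entry
    have hsame1 : Mem.SameExcept
      [⟨(e.reg .rsp).toNat - 400, (e.reg .rsp).toNat⟩,
       shadowSpan ((e.reg .rsp).toNat - 120) ((e.reg .rsp).toNat - 56),
       ⟨0x800000, 0x1000020⟩,
       ⟨R.cur, R.cur + 8⟩] e.mem s_10833ar.mem := by u_same
    -- THE SHAPE (for the forest WITH the map: the pointer dangles): every window of the footprint is loose for the heap `Hc`
    have hshape1 : Shape (DGifGetScreenDesc.withMap F mp) R s_10833ar.mem := by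
      apply hok.shape.sameExcept (hok.owns.placed hinv.heap) hinv.heap ⟨hcur.1, hcur.2.1⟩ hs1
      intro w hw
      simp only [List.mem_cons, List.not_mem_nil, or_false] at hw
      rcases hw with rfl | rfl | rfl | rfl | rfl
      · apply Loose.stack hinv.heap
        · simp only
          omega
        · simp only
          omega
        · simp only
          omega
      · apply Loose.header hinv.heap ⟨hcur.1, hcur.2.1⟩ hccap
        · simp only
          omega
        · simp only
          omega
      · exact Loose.shadow hinv.heap hcur.2.1 ha1lo
      · apply Loose.header hinv.heap ⟨hcur.1, hcur.2.1⟩ hcap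
        · simp only
          omega
        · simp only
          omega
      · exact Loose.shadow hinv.heap hcur.2.1 ha2lo
    -- the reader is where it was
    have hrem1 : rem R s_10833ar.mem = rem R v.mem := by
      apply rem_sameExcept hs1 (by omega)
      intro w hw
      simp only [List.mem_cons, List.not_mem_nil, or_false] at hw
      rcases hw with rfl | rfl | rfl | rfl | rfl
      · simp only
        omega
      · simp only
        omega
      · simp only
        omega
      · simp only
        omega
      · simp only
        omega
    -- what is owned after the two `free`s: the forest without the map, which is the entry's forest (`F.scm = none`)
    have hown1 : Owns ((Hc.release mp.colors).release mp.obj) ({ F with scm := none } : Forest).owned :=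
      hok.owns.free_scm (m := mp) rfl
    rw [Forest.set_scm_eq hscm0] at hown1
    refine ReachVia.done (Or.inr ?_)
    exact {
      core := {
        entry := hcore.entry
        pre := hcore.pre
        rip := w_rip
        rsp := w_rsp
        rbx := (w_kept.get .rbx rfl).trans c_rbx
        rbp := (w_kept.get .rbp rfl).trans hcore.rbp
        slot_r15 := hs15
        slot_r14 := hs14
        slot_r13 := hs13
        slot_r12 := hs12
        slot_rbp := hsbp
        slot_rbx := hsbx
        slot_ra := hsra
        rem := by
          rw [hrem1]
          exact hcore.rem
        same := hsame1
        code := w_code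
        abi := w_inv
      }
      region := hregion.trans ((SameRegion.release Hc mp.colors).trans (SameRegion.release _ mp.obj))
      inv := hinv2
      shape := hshape1
      placed := ((hok.owns.placed hinv.heap).release mp.colors).release mp.obj
      owns := hown1
      r12 := w_r12
    }
  case cont =>
    -- 0x108284 FROM 0x10827e (dgif_lib.c:290): three bytes were read: on into the loop's body, nothing written since `v`
    refine ReachVia.done (Or.inl ?_)
    exact {
      head := {
        core := {
          entry := hcore.entry
          pre := hcore.pre
          rip := w_rip
          rsp := w_rsp
          rbx := (w_kept.get .rbx rfl).trans c_rbx
          rbp := (w_kept.get .rbp rfl).trans hcore.rbp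
          slot_r15 := by
            rw [w_mem]
            exact k_r15
          slot_r14 := by
            rw [w_mem]
            exact k_r14
          slot_r13 := by
            rw [w_mem]
            exact k_r13
          slot_r12 := by
            rw [w_mem]
            exact k_r12
          slot_rbp := by
            rw [w_mem]
            exact k_rbp
          slot_rbx := by
            rw [w_mem]
            exact k_rbx
          slot_ra := by
            rw [w_mem]
            exact k_ra
          rem := by
            rw [w_mem]
            exact hcore.rem
          same := by
            rw [w_mem]
            exact hsame
          code := ProgX.Base.conv_code_in w_eq
          abi := by
            refine ProgX.Base.abiInv_of ?_ ?_
            · rw [w_flags]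
              simp only [X86.User.df_setStatus]
              exact hdf
            · rw [w_mxcsr]
              exact hmx
        }
        region := hregion
        inv := by
          rw [w_mem]
          exact hinv
        ok := by
          rw [w_mem]
          exact hok
        idx := by
          rw [w_kept.get .r13 rfl]
          exact hidx
      }
      lt := hlt
    }


/-- **10833FH (ret29) … 1080F7H** (dgif_lib.c:292-294): the checked store `gif->SColorMap = NULL` (`Shape.set_scm` with `none`: the
pointer no longer dangles), the checked store `gif->Error = D_GIF_ERR_READ_FAILED`, `r12d = 0`, to the epilogue: `Exit` with the heap
after the two `free`s and the entry's forest (`F.scm = none`: what GIF_ERROR promises). -/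
theorem gsd5_seg_null (Lay : Layout) (hLay : Lay.hi = 0x1000000) (μ : Microarch) (hμ : UserX.MicroOK μ) (u₀ : State)
    (hcode : HasCodeNat Lay u₀ Gif.L.DGifGetScreenDesc.entry Gif.Code.code_DGifGetScreenDesc.nat Gif.L.DGifGetScreenDesc.size)
    (H : Heap) (rest : List Obj) (frames : List (Nat × FrameLayout)) (F : Forest) (R : Rd) (Hc : Heap) (mp : Map)
    (e : State) (ret : Word)
    (h_asan_store8_noabort : Asan.SmallCheck Lay μ ProgX.Base.WayInv (ProgX.Base.CodeOK u₀) [.rax, .rcx, .rdx] 8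
      ProgX.Base.L.__asan_store8_noabort.entry)
    (h_asan_store4_noabort : Asan.SmallCheck Lay μ ProgX.Base.WayInv (ProgX.Base.CodeOK u₀) [.rax, .rcx, .rdx] 4
      ProgX.Base.L.__asan_store4_noabort.entry)
    (v : State) (hat : gsd5_AtRet29 H rest frames F R Hc mp u₀ e ret v) :
    ReachVia Lay μ ProgX.Base.WayInv v (DGifGetScreenDesc.Exit H rest frames F R u₀ e ret) := by
  obtain ⟨hcore, hregion, hinv, hshape, hplaced, howns, c_r12⟩ := hat
  have he := hcore.entry
  v_entry he
  obtain ⟨henv, hrdi, hscm0⟩ := hcore.pre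
  have w_rip := hcore.rip
  have c_rsp : v.reg .rsp = e.reg .rsp - 120 := hcore.rsp
  have c_rbx : v.reg .rbx = e.reg .rdi := hcore.rbx
  have w_kept : RegsKept [.rsp] v v := RegsKept.refl _ _
  have w_eq : Mem.EqOn ProgX.Base.L.textLo ProgX.Base.L.textHi u₀.mem v.mem := ProgX.Base.conv_code_eqOn hcore.code
  have hdf := (show abiInv _ from hcore.abi).1
  have hmx := (show abiInv _ from hcore.abi).2
  have hsse := ProgX.Base.sseOK_of_abiInv hcore.abi
  have k_r15 : v.mem.readLE (e.reg .rsp - 8) 8 = (e.reg .r15).toNat := hcore.slot_r15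
  have k_r14 : v.mem.readLE (e.reg .rsp - 16) 8 = (e.reg .r14).toNat := hcore.slot_r14
  have k_r13 : v.mem.readLE (e.reg .rsp - 24) 8 = (e.reg .r13).toNat := hcore.slot_r13
  have k_r12 : v.mem.readLE (e.reg .rsp - 32) 8 = (e.reg .r12).toNat := hcore.slot_r12
  have k_rbp : v.mem.readLE (e.reg .rsp - 40) 8 = (e.reg .rbp).toNat := hcore.slot_rbp
  have k_rbx : v.mem.readLE (e.reg .rsp - 48) 8 = (e.reg .rbx).toNat := hcore.slot_rbx
  have k_ra : UInt64.ofNat (v.mem.readLE (e.reg .rsp) 8) = ret := hcore.slot_ra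
  have hsame : Mem.SameExcept
    [⟨(e.reg .rsp).toNat - 400, (e.reg .rsp).toNat⟩,
     shadowSpan ((e.reg .rsp).toNat - 120) ((e.reg .rsp).toNat - 56),
     ⟨0x800000, 0x1000020⟩,
     ⟨R.cur, R.cur + 8⟩] e.mem v.mem := hcore.same
  have hcur := henv.ctx.cursor_range henv.heap.inv.shadow
  have hbase : ((Hc.release mp.colors).release mp.obj).base = 0x800000 := hregion.1.trans henv.heap.base
  have hgin := howns.inside hinv.heap (o := (F.gif, 120)) List.mem_cons_self
  simp only at hgin
  rw [hbase] at hgin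
  have hgin1 := hgin.1
  have hgin2 := hgin.2.2.2.2
  clear hgin
  -- gif is live in the present heap: what both check goals ask
  have hgif : ((Hc.release mp.colors).release mp.obj).Live F.gif 120 := howns.live (F.gif, 120) List.mem_cons_self
  have hgl : LiveIn (((Hc.release mp.colors).release mp.obj).liveObjs ++ rest) (DGifGetScreenDesc.framesIn frames e) F.gif 120 :=
    hgif.liveIn rest _ (Nat.le_refl _) (Nat.le_refl _)
  u_walk hcode [hμ.vendor] until [Gif.L.DGifGetScreenDesc.at_1080f7] span [ProgX.Base.L.textLo, ProgX.Base.L.textHi] side (v_side)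
  case check_108342 =>
    -- dgif_lib.c:292 the store `gif->SColorMap = NULL`: 8 bytes inside gif
    have hun : ShadowUntouched v.mem s_108342.mem := by v_untouched
    exact hgl.accSmall hinv.shadow hun _ 8 (by decide) (by u_omega) (by u_omega)
  case check_108353 =>
    -- dgif_lib.c:293 the store of `gif->Error`: 4 bytes inside gif
    have hun : ShadowUntouched v.mem s_108353.mem := by v_untouched
    exact hgl.accSmall hinv.shadow hun _ 4 (by decide) (by u_omega) (by u_omega)
  -- 0x1080f7 FROM 0x108365 (dgif_lib.c:294): `SColorMap = NULL`, `Error = D_GIF_ERR_READ_FAILED`, `r12d = 0`: GIF_ERROR with the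
  -- heap after the two `free`s and the entry's forest. The four stores since `v`: two return addresses of check calls (stack),
  -- the pointer field, the error field
  have hinvA := hinv.writeLE_out (e.reg .rsp - 128) 8 1082183 (by u_omega)
    (Or.inl (by
      rw [hbase]
      u_omega)) (Or.inl (by u_omega))
  have hinvB := hinvA.writeLE_live hgif (e.reg .rdi + 24) 8 0 (by u_omega) (by u_omega)
  have hinvC := hinvB.writeLE_out (e.reg .rsp - 128) 8 1082200 (by u_omega)
    (Or.inl (by
      rw [hbase]
      u_omega)) (Or.inl (by u_omega))
  have hinvD := hinvC.writeLE_live hgif (e.reg .rdi + 96) 4 102 (by u_omega) (by u_omega)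
  rw [← w_mem] at hinvD
  clear hinvA hinvB hinvC
  have hs : Mem.SameExcept
    [⟨(e.reg .rsp).toNat - 400, (e.reg .rsp).toNat - 120⟩,
     ⟨F.gif + 24, F.gif + 32⟩,
     ⟨F.gif + 96, F.gif + 100⟩] v.mem s_108365.mem := by
    rw [w_mem]
    u_same
  -- the field holds NULL now
  have hnull : GifFileType.SColorMap s_108365.mem F.gif = 0 := by
    simp only [gfield]
    rw [w_mem]
    rw [rd_writeLE_disjoint _ _ _ _ _ _ (by u_omega) (by omega) (by u_omega)]
    rw [rd_writeLE_disjoint _ _ _ _ _ _ (by u_omega) (by omega) (by u_omega)]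
    rw [rd_writeLE_same _ (e.reg .rdi + 24) 8 0 _ (by u_omega) (by decide)]
  -- THE SHAPE for the forest without the map, which is the entry's forest (`F.scm = none`)
  have hshape1 : Shape ({ F with scm := none } : Forest) R s_108365.mem := by
    refine hshape.set_scm hplaced hinv.heap ⟨hcur.1, hcur.2.1⟩ hs ?_ none hnull
    intro w hw
    simp only [List.mem_cons, List.not_mem_nil, or_false] at hw
    rcases hw with rfl | rfl | rfl
    · left
      apply Loose.stack hinv.heap
      · simp only
        omega
      · simp only
        omega
      · simp only
        omega
    · right
      exact ⟨Nat.le_refl _, Nat.le_refl _⟩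
    · left
      apply Loose.gifScalar
      right
      right
      simp only
      omega
  rw [Forest.set_scm_eq hscm0] at hshape1
  have hrem1 : rem R s_108365.mem = rem R v.mem := by
    apply rem_sameExcept hs (by omega)
    intro w hw
    simp only [List.mem_cons, List.not_mem_nil, or_false] at hw
    rcases hw with rfl | rfl | rfl
    · simp only
      omega
    · simp only
      omega
    · simp only
      omega
  refine ReachVia.done ⟨(Hc.release mp.colors).release mp.obj, F, ?_⟩
  exact {
    core := {
      entry := hcore.entry
      pre := hcore.pre
      rip := w_rip
      rsp := w_rsp
      rbx := (w_kept.get .rbx rfl).trans c_rbx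
      rbp := (w_kept.get .rbp rfl).trans hcore.rbp
      slot_r15 := by
        rw [w_mem]
        u_frame k_r15
      slot_r14 := by
        rw [w_mem]
        u_frame k_r14
      slot_r13 := by
        rw [w_mem]
        u_frame k_r13
      slot_r12 := by
        rw [w_mem]
        u_frame k_r12
      slot_rbp := by
        rw [w_mem]
        u_frame k_rbp
      slot_rbx := by
        rw [w_mem]
        u_frame k_rbx
      slot_ra := by
        rw [w_mem]
        u_frame k_ra
      rem := by
        rw [hrem1]
        exact hcore.rem
      same := by
        rw [w_mem]
        u_same
      code := ProgX.Base.conv_code_in w_eq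
      abi := by
        refine ProgX.Base.abiInv_of ?_ ?_
        · rw [w_flags]
          exact w_df_108353
        · rw [w_mxcsr]
          exact hmx
    }
    region := hregion
    sameBut := ⟨rfl, rfl, rfl, rfl, rfl⟩
    inv := hinvD
    ok := ⟨howns, hshape1⟩
    res := by
      right
      rw [w_r12]
      decide
    err := by
      intro _
      exact hscm0
  }

end Gif.Spec.DGifGetScreenDesc_5
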